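-- pv_equiv track=rewrite | github.com/ayukyo/alltoolkit | Python/anagram_utils/mod.py | anagram_distance
-- ===== SOURCE A (Python) =====
-- from collections import Counter, defaultdict
--
-- def get_char_count(text: str) -> Counter:
--     """
--     获取文本中每个字符的出现次数
--
--     Args:
--         text: 输入文本
--
--     Returns:
--         字符计数的 Counter 对象
--
--     Examples:
--         >>> get_char_count("hello")
--         Counter({'l': 2, 'h': 1, 'e': 1, 'o': 1})
--     """
--     return Counter(c.lower() for c in text if c.isalnum())
--
-- def anagram_distance(text1: str, text2: str) -> int:
--     """
--     计算两个字符串的"变位距离"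
--     即需要移除多少字符才能使它们成为变位词
--
--     Args:
--         text1: 第一个字符串
--         text2: 第二个字符串
--
--     Returns:
--         变位距离（越小越相似）
--
--     Examples:
--         >>> anagram_distance("listen", "silent")
--         0
--         >>> anagram_distance("listen", "list")
--         2
--         >>> anagram_distance("abc", "def")
--         6
--     """
--     count1 = get_char_count(text1)
--     count2 = get_char_count(text2)
--
--     # 计算差异
--     all_chars = set(count1.keys()) | set(count2.keys())
--     distance = 0
--
--     for char in all_chars:
--         distance += abs(count1.get(char, 0) - count2.get(char, 0))
--
--     return distance
-- ===== SOURCE B (Python) =====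
-- def anagram_distance(text1: str, text2: str) -> int:
--     s1 = sorted(c.lower() for c in text1 if c.isalnum())
--     s2 = sorted(c.lower() for c in text2 if c.isalnum())
--     i = j = 0
--     distance = 0
--     while i < len(s1) and j < len(s2):
--         if s1[i] == s2[j]:
--             i += 1
--             j += 1
--         elif s1[i] < s2[j]:
--             distance += 1
--             i += 1
--         else:
--             distance += 1
--             j += 1
--     return distance + (len(s1) - i) + (len(s2) - j)
-- ===== Notes on version B (the rewrite author's own statement) =====
-- stated objective: alternative
-- what changed: Replaces Counter hashing plus a scan over the union of keys by sorting both filtered character lists and merging them with two pointers, counting unmatched characters.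
import Mathlib
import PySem

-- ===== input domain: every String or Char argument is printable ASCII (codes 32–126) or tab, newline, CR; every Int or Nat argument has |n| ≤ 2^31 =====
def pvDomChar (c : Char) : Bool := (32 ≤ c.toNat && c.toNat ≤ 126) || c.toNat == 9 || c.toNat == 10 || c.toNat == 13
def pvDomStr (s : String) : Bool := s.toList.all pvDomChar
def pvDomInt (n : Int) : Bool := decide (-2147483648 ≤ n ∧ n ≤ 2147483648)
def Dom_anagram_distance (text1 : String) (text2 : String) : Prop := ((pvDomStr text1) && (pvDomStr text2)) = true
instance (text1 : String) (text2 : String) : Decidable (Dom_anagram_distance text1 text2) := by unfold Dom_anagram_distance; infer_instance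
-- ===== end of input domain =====

-- B replaces Counter hashing plus a scan over the union of keys by sorting both
-- filtered character lists and merging them with two pointers (alternative algorithm).

-- ===== PORT A =====
def get_char_count (text : String) : PySem.Dict Char Int :=
  PySem.Dict.counter ((text.toList.filter (fun c => PySem.Chars.isalnum c)).map PySem.Chars.lowerChar)

def anagram_distance (text1 : String) (text2 : String) : Int :=
  let count1 := get_char_count text1
  let count2 := get_char_count text2
  let all_chars : PySem.Set Char :=
    PySem.Set.union (PySem.Set.ofList count1.keys) (PySem.Set.ofList count2.keys)
  all_chars.foldl (fun distance ch => distance + |count1.getD ch 0 - count2.getD ch 0|) 0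

-- ===== PORT B =====
def mergeDistance : List Char → List Char → Int
  | [], ys => ys.length
  | x :: xs, [] => (x :: xs).length
  | x :: xs, y :: ys =>
    if x = y then mergeDistance xs ys
    else if x < y then 1 + mergeDistance xs (y :: ys)
    else 1 + mergeDistance (x :: xs) ys

def anagram_distance_alt (text1 : String) (text2 : String) : Int :=
  let s1 := PySem.List.sorted ((text1.toList.filter (fun c => PySem.Chars.isalnum c)).map PySem.Chars.lowerChar) (fun c => c) false
  let s2 := PySem.List.sorted ((text2.toList.filter (fun c => PySem.Chars.isalnum c)).map PySem.Chars.lowerChar) (fun c => c) false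
  mergeDistance s1 s2

-- ===== PRECONDITION & SPEC =====
def Spec_anagram_distance (text1 : String) (text2 : String) (out : Int) : Prop := out = anagram_distance_alt text1 text2
instance (text1 : String) (text2 : String) (out : Int) : Decidable (Spec_anagram_distance text1 text2 out) := by unfold Spec_anagram_distance; infer_instance

-- ===== CLAIM (what is proved, stated in full; the proofs are below) =====
def Claim_equal_anagram_distance : Prop := ∀ (text1 : String) (text2 : String), Dom_anagram_distance text1 text2 → Spec_anagram_distance text1 text2 (anagram_distance text1 text2)

-- ===== LEMMAS AND PROOFS =====

lemma msub_cons_left (x : Char) (s t : Multiset Char) (h : t.count x = 0) :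
    (x ::ₘ s) - t = x ::ₘ (s - t) := by
  ext a
  by_cases hax : a = x <;>
    simp [Multiset.count_sub, Multiset.count_cons, hax, h] <;> omega

lemma msub_cons_right (x : Char) (s t : Multiset Char) (h : s.count x = 0) :
    s - (x ::ₘ t) = s - t := by
  ext a
  by_cases hax : a = x <;>
    simp [Multiset.count_sub, Multiset.count_cons, hax, h]

-- B side: the two-pointer merge of two ≤-sorted lists computes the total size of
-- the two multiset differences.
lemma mergeDistance_eq_multiset :
    ∀ (n : ℕ) (xs ys : List Char), xs.length + ys.length = n →
    xs.Pairwise (· ≤ ·) → ys.Pairwise (· ≤ ·) →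
    mergeDistance xs ys
      = ((↑xs - ↑ys : Multiset Char).card : Int) + ((↑ys - ↑xs : Multiset Char).card : Int) := by
  intro n
  induction n using Nat.strong_induction_on with
  | _ n ih =>
    intro xs ys hn hx hy
    match xs, ys with
    | [], ys => simp [mergeDistance]
    | x :: xs, [] => simp [mergeDistance]
    | x :: xs, y :: ys =>
      by_cases hxy : x = y
      · subst hxy
        rw [show mergeDistance (x :: xs) (x :: ys) = mergeDistance xs ys by
              simp [mergeDistance]]
        rw [ih (xs.length + ys.length) (by simp at hn; omega) xs ys rfl hx.tail hy.tail]
        have h1 : ((x :: xs : List Char) : Multiset Char) - ((x :: ys : List Char) : Multiset Char)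
            = (↑xs - ↑ys : Multiset Char) := by
          ext a; by_cases hax : a = x <;>
            simp [Multiset.count_sub, Multiset.count_cons, hax]
        have h2 : ((x :: ys : List Char) : Multiset Char) - ((x :: xs : List Char) : Multiset Char)
            = (↑ys - ↑xs : Multiset Char) := by
          ext a; by_cases hax : a = x <;>
            simp [Multiset.count_sub, Multiset.count_cons, hax]
        rw [show ((x :: xs : List Char) : Multiset Char) = (x ::ₘ ↑xs) from rfl,
            show ((x :: ys : List Char) : Multiset Char) = (x ::ₘ ↑ys) from rfl] at h1 h2 ⊢
        rw [h1, h2]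
      · by_cases hlt : x < y
        · -- x < y : x occurs in neither y :: ys side
          have hxny : (((y :: ys : List Char)) : Multiset Char).count x = 0 := by
            rw [Multiset.count_eq_zero]
            intro hmem
            have : y ≤ x := by
              rcases (List.mem_cons.1 (by simpa using hmem)) with h | h
              · exact le_of_eq h.symm
              · exact le_trans (List.rel_of_pairwise_cons hy h) (le_refl x)
            exact absurd hlt (not_lt.2 this)
          rw [show mergeDistance (x :: xs) (y :: ys) = 1 + mergeDistance xs (y :: ys) by
                simp [mergeDistance, hxy, hlt]]
          rw [ih (xs.length + (y :: ys).length) (by simp at hn ⊢; omega) xs (y :: ys) rfl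
                hx.tail hy]
          have h1 : ((x :: xs : List Char) : Multiset Char) - ((y :: ys : List Char) : Multiset Char)
              = x ::ₘ ((↑xs : Multiset Char) - ↑(y :: ys)) := by
            rw [← Multiset.cons_coe]
            exact msub_cons_left x _ _ hxny
          have h2 : ((y :: ys : List Char) : Multiset Char) - ((x :: xs : List Char) : Multiset Char)
              = (↑(y :: ys) : Multiset Char) - ↑xs := by
            rw [show ((x :: xs : List Char) : Multiset Char) = (x ::ₘ ↑xs) from rfl]
            exact msub_cons_right x _ _ hxny
          rw [h1, h2]
          simp
          ring
        · -- y < x : symmetric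
          have hgt : y < x := lt_of_le_of_ne (not_lt.1 hlt) (fun h => hxy h.symm)
          have hynx : (((x :: xs : List Char)) : Multiset Char).count y = 0 := by
            rw [Multiset.count_eq_zero]
            intro hmem
            have : x ≤ y := by
              rcases (List.mem_cons.1 (by simpa using hmem)) with h | h
              · exact le_of_eq h.symm
              · exact List.rel_of_pairwise_cons hx h
            exact absurd hgt (not_lt.2 this)
          rw [show mergeDistance (x :: xs) (y :: ys) = 1 + mergeDistance (x :: xs) ys by
                simp [mergeDistance, hxy, hlt]]
          rw [ih ((x :: xs).length + ys.length) (by simp at hn ⊢; omega) (x :: xs) ys rfl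
                hx hy.tail]
          have h1 : ((y :: ys : List Char) : Multiset Char) - ((x :: xs : List Char) : Multiset Char)
              = y ::ₘ ((↑ys : Multiset Char) - ↑(x :: xs)) := by
            rw [← Multiset.cons_coe]
            exact msub_cons_left y _ _ hynx
          have h2 : ((x :: xs : List Char) : Multiset Char) - ((y :: ys : List Char) : Multiset Char)
              = (↑(x :: xs) : Multiset Char) - ↑ys := by
            rw [show ((y :: ys : List Char) : Multiset Char) = (y ::ₘ ↑ys) from rfl]
            exact msub_cons_right y _ _ hynx
          rw [h1, h2]
          simp
          ring

-- Summing the multiplicities of a multiset over any duplicate-free list covering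
-- its support gives its cardinality.
lemma sum_count_over_cover (K : List Char) (s : Multiset Char) (hK : K.Nodup)
    (hcov : ∀ c ∈ s, c ∈ K) :
    (K.map (fun c => (s.count c : Int))).sum = (s.card : Int) := by
  have h1 : (K.map (fun c => (s.count c : Int))).sum
      = ∑ c ∈ K.toFinset, (s.count c : Int) := by
    rw [List.sum_toFinset _ hK]
  rw [h1]
  have h2 : ∑ c ∈ K.toFinset, (s.count c : Int)
      = ∑ c ∈ s.toFinset, (s.count c : Int) := by
    apply (Finset.sum_subset _ _).symm
    · intro c hc
      exact List.mem_toFinset.2 (hcov c (Multiset.mem_toFinset.1 hc))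
    · intro c _ hc
      simp [Multiset.count_eq_zero.2 (fun h => hc (Multiset.mem_toFinset.2 h))]
  rw [h2]
  rw [← Nat.cast_sum]
  norm_cast
  exact Multiset.toFinset_sum_count_eq s

-- A side: folding |count1 - count2| over any duplicate-free list covering both
-- supports computes the same quantity.
lemma foldl_abs_eq_multiset (K f1 f2 : List Char) (hK : K.Nodup)
    (hcov : ∀ c, c ∈ f1 ∨ c ∈ f2 → c ∈ K) :
    K.foldl (fun d c => d + |(f1.count c : Int) - (f2.count c : Int)|) 0
      = ((↑f1 - ↑f2 : Multiset Char).card : Int) + ((↑f2 - ↑f1 : Multiset Char).card : Int) := by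
  rw [PySem.List.foldl_add]
  have habs : ∀ c : Char,
      |(f1.count c : Int) - (f2.count c : Int)|
        = ((↑f1 - ↑f2 : Multiset Char).count c : Int) + ((↑f2 - ↑f1 : Multiset Char).count c : Int) := by
    intro c
    have e1 : (↑f1 - ↑f2 : Multiset Char).count c = f1.count c - f2.count c := by
      rw [Multiset.count_sub]; simp
    have e2 : (↑f2 - ↑f1 : Multiset Char).count c = f2.count c - f1.count c := by
      rw [Multiset.count_sub]; simp
    rw [e1, e2]
    rcases le_total (f1.count c) (f2.count c) with h | h
    · rw [abs_of_nonpos (by push_cast; omega)]; push_cast; omega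
    · rw [abs_of_nonneg (by push_cast; omega)]; push_cast; omega
  rw [List.map_congr_left (fun c _ => habs c)]
  rw [show (fun c => ((↑f1 - ↑f2 : Multiset Char).count c : Int) + ((↑f2 - ↑f1 : Multiset Char).count c : Int))
        = fun c => ((fun c => ((↑f1 - ↑f2 : Multiset Char).count c : Int)) c
            + (fun c => ((↑f2 - ↑f1 : Multiset Char).count c : Int)) c) from rfl]
  rw [PySem.List.sum_map_add_int]
  rw [sum_count_over_cover K _ hK (fun c hc => by
        apply hcov; left
        have := Multiset.mem_of_le (Multiset.sub_le_self _ _) hc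
        simpa using this),
      sum_count_over_cover K _ hK (fun c hc => by
        apply hcov; right
        have := Multiset.mem_of_le (Multiset.sub_le_self _ _) hc
        simpa using this)]
  simp

-- ===== VERDICT (by name: the statement is the Claim_ definition above) =====
theorem anagram_distance_spec : Claim_equal_anagram_distance := by
  intro text1 text2 _
  unfold Spec_anagram_distance anagram_distance anagram_distance_alt get_char_count
  set f1 := (text1.toList.filter (fun c => PySem.Chars.isalnum c)).map PySem.Chars.lowerChar with hf1
  set f2 := (text2.toList.filter (fun c => PySem.Chars.isalnum c)).map PySem.Chars.lowerChar with hf2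
  simp only [PySem.Dict.keys_counter, PySem.Set.ofList_ofList]
  have hfun : (fun (d : Int) (ch : Char) =>
        d + |(PySem.Dict.counter f1).getD ch 0 - (PySem.Dict.counter f2).getD ch 0|)
      = fun (d : Int) (ch : Char) => d + |(f1.count ch : Int) - (f2.count ch : Int)| := by
    funext d ch
    rw [PySem.Dict.getD_counter, PySem.Dict.getD_counter]
  rw [hfun]
  have hnodup : (PySem.Set.union (PySem.Set.ofList f1) (PySem.Set.ofList f2)).Nodup :=
    PySem.Set.nodup_union _ _ (PySem.Set.nodup_ofList f1)
  have hcov : ∀ c, c ∈ f1 ∨ c ∈ f2 →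
      c ∈ PySem.Set.union (PySem.Set.ofList f1) (PySem.Set.ofList f2) := by
    intro c hc
    simp only [PySem.Set.mem_union, PySem.Set.mem_ofList]
    exact hc
  rw [foldl_abs_eq_multiset _ f1 f2 hnodup hcov]
  have hp1 : (PySem.List.sorted f1 (fun c => c) false).Pairwise (· ≤ ·) := by
    simpa using PySem.List.sorted_pairwise f1 (fun c => c)
  have hp2 : (PySem.List.sorted f2 (fun c => c) false).Pairwise (· ≤ ·) := by
    simpa using PySem.List.sorted_pairwise f2 (fun c => c)
  rw [mergeDistance_eq_multiset
        ((PySem.List.sorted f1 (fun c => c) false).length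
          + (PySem.List.sorted f2 (fun c => c) false).length)
        _ _ rfl hp1 hp2]
  have hc1 : ((PySem.List.sorted f1 (fun c => c) false : List Char) : Multiset Char) = ↑f1 :=
    Multiset.coe_eq_coe.2 (PySem.List.sorted_perm f1 (fun c => c) false)
  have hc2 : ((PySem.List.sorted f2 (fun c => c) false : List Char) : Multiset Char) = ↑f2 :=
    Multiset.coe_eq_coe.2 (PySem.List.sorted_perm f2 (fun c => c) false)
  rw [hc1, hc2]
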